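-- pv_equiv track=rewrite | github.com/Narendra842006/osinet-portal2 | app.py | estimate_timezone_from_domain
-- ===== SOURCE A (Python) =====
-- def estimate_timezone_from_domain(domain):
--     """Estimate timezone based on domain TLD."""
--     tld_timezones = {
--         '.in': 'IST (UTC+5:30)',
--         '.uk': 'GMT/BST (UTC+0/+1)',
--         '.de': 'CET (UTC+1)',
--         '.jp': 'JST (UTC+9)',
--         '.au': 'AEST (UTC+10)',
--         '.ca': 'Multiple (UTC-8 to UTC-3:30)',
--         '.us': 'Multiple (UTC-10 to UTC-4)',
--         '.com': 'Global (Multiple)',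
--         '.org': 'Global (Multiple)',
--         '.net': 'Global (Multiple)'
--     }
--
--     for tld, timezone in tld_timezones.items():
--         if domain.endswith(tld):
--             return timezone
--
--     return 'Unknown'
-- ===== SOURCE B (Python) =====
-- def estimate_timezone_from_domain(domain):
--     """Estimate timezone based on domain TLD."""
--     tld_timezones = {
--         '.in': 'IST (UTC+5:30)',
--         '.uk': 'GMT/BST (UTC+0/+1)',
--         '.de': 'CET (UTC+1)',
--         '.jp': 'JST (UTC+9)',
--         '.au': 'AEST (UTC+10)',
--         '.ca': 'Multiple (UTC-8 to UTC-3:30)',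
--         '.us': 'Multiple (UTC-10 to UTC-4)',
--         '.com': 'Global (Multiple)',
--         '.org': 'Global (Multiple)',
--         '.net': 'Global (Multiple)'
--     }
--     _, sep, last = domain.rpartition('.')
--     if not sep:
--         return 'Unknown'
--     return tld_timezones.get('.' + last, 'Unknown')
-- ===== Notes on version B (the rewrite author's own statement) =====
-- stated objective: idiomatic
-- what changed: Replaces A's linear scan of endswith tests over the dict items by computing the single candidate TLD from the text after the last '.' (rpartition) and doing one dict lookup with a default; exact because every key is a single dot-prefixed label.
import Mathlib
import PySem

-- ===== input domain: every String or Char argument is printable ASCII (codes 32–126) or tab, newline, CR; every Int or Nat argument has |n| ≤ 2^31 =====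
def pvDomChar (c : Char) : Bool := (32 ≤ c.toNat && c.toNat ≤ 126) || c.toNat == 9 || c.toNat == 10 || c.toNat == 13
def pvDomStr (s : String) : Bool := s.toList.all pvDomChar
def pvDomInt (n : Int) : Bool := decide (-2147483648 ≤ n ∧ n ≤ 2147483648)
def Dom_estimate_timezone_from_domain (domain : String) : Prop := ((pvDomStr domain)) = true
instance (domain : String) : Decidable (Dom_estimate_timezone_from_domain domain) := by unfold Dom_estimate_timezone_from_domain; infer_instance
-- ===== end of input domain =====

-- B replaces A's linear scan of endswith tests by deriving the single candidate TLD from the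
-- last '.' (rpartition) and one dict lookup; objective: idiomatic (no measured speedup claimed).

-- ===== PORT A =====
-- A's tld_timezones dict literal (10 distinct keys), built once; A iterates its .items() in insertion order
def tldTimezonesA : PySem.Dict String String := PySem.Dict.ofList
  [(".in", "IST (UTC+5:30)"), (".uk", "GMT/BST (UTC+0/+1)"), (".de", "CET (UTC+1)"),
   (".jp", "JST (UTC+9)"), (".au", "AEST (UTC+10)"), (".ca", "Multiple (UTC-8 to UTC-3:30)"),
   (".us", "Multiple (UTC-10 to UTC-4)"), (".com", "Global (Multiple)"),
   (".org", "Global (Multiple)"), (".net", "Global (Multiple)")]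

-- the 'for tld, timezone in tld_timezones.items(): if domain.endswith(tld): return timezone' loop
def tzLoopA (domain : String) : List (String × String) → String
  | [] => "Unknown"
  | (tld, tz) :: rest => if PySem.Str.endswith domain tld then tz else tzLoopA domain rest

def estimate_timezone_from_domain (domain : String) : String :=
  tzLoopA domain tldTimezonesA.items

-- ===== PORT B =====
def tldTimezonesB : PySem.Dict String String := PySem.Dict.ofList
  [(".in", "IST (UTC+5:30)"), (".uk", "GMT/BST (UTC+0/+1)"), (".de", "CET (UTC+1)"),
   (".jp", "JST (UTC+9)"), (".au", "AEST (UTC+10)"), (".ca", "Multiple (UTC-8 to UTC-3:30)"),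
   (".us", "Multiple (UTC-10 to UTC-4)"), (".com", "Global (Multiple)"),
   (".org", "Global (Multiple)"), (".net", "Global (Multiple)")]

-- domain.rpartition('.') has no PySem primitive; hand-port, exact: 'last' is the part after the
-- last '.' (chars of the reversed string up to the first '.'), and sep is nonempty iff '.' occurs.
def estimate_timezone_from_domain_alt (domain : String) : String :=
  let cs := domain.toList
  let last := (cs.reverse.takeWhile (· != '.')).reverse
  if cs.contains '.' then
    tldTimezonesB.getD (String.ofList ('.' :: last)) "Unknown"
  else "Unknown"

-- ===== PRECONDITION & SPEC =====
def Spec_estimate_timezone_from_domain (domain : String) (out : String) : Prop := out = estimate_timezone_from_domain_alt domain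
instance (domain : String) (out : String) : Decidable (Spec_estimate_timezone_from_domain domain out) := by unfold Spec_estimate_timezone_from_domain; infer_instance

-- ===== CLAIM (what is proved, stated in full; the proofs are below) =====
def Claim_equal_estimate_timezone_from_domain : Prop := ∀ (domain : String), Dom_estimate_timezone_from_domain domain → Spec_estimate_timezone_from_domain domain (estimate_timezone_from_domain domain)

-- ===== LEMMAS AND PROOFS =====

-- (tr ++ ['.']) is a prefix of r iff '.' occurs in r and the dot-free part before the first '.' is tr
lemma prefix_dotfree (tr r : List Char) (h : '.' ∉ tr) :
    (tr ++ ['.']) <+: r ↔ ('.' ∈ r ∧ r.takeWhile (· != '.') = tr) := by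
  have htr : tr.takeWhile (· != '.') = tr := by
    rw [List.takeWhile_eq_self_iff]
    intro a ha
    have : a ≠ '.' := fun e => h (e ▸ ha)
    simpa using this
  constructor
  · rintro ⟨rest, rfl⟩
    refine ⟨by simp, ?_⟩
    rw [List.append_assoc, List.takeWhile_append]
    simp [htr]
  · rintro ⟨hmem, htw⟩
    have hsplit := List.takeWhile_append_dropWhile (p := (· != '.')) (l := r)
    have hne : r.dropWhile (· != '.') ≠ [] := by
      intro hnil
      rw [hnil, List.append_nil, htw] at hsplit
      exact h (hsplit ▸ hmem)
    obtain ⟨c, rest, hd⟩ := List.exists_cons_of_ne_nil hne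
    have hhead := List.head_dropWhile_not (· != '.') hne
    have hc : c = '.' := by
      simp only [hd] at hhead; simpa using hhead
    exact ⟨rest, by rw [← hsplit, htw, hd, hc]; simp⟩

-- endswith('.'++t) for a dot-free t is: a '.' occurs and the segment after the last '.' is t
lemma endswith_dotfree (cs t : List Char) (h : '.' ∉ t) :
    PySem.Chars.endswith cs ('.' :: t) = true ↔
      ('.' ∈ cs ∧ (cs.reverse.takeWhile (· != '.')).reverse = t) := by
  rw [PySem.Chars.endswith_iff, ← List.reverse_prefix,
      show ('.' :: t).reverse = t.reverse ++ ['.'] from by simp,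
      prefix_dotfree _ _ (by simpa using h)]
  simp [List.reverse_eq_iff]

-- each of A's endswith tests, as a decidable condition on the segment after the last '.'
lemma hend (domain : String) (tld : String) (t' : List Char)
    (hl : tld.toList = '.' :: t') (hnd : '.' ∉ t') :
    PySem.Str.endswith domain tld =
      decide ('.' ∈ domain.toList ∧ (domain.toList.reverse.takeWhile (· != '.')).reverse = t') := by
  apply Bool.eq_iff_iff.mpr
  rw [decide_eq_true_eq, PySem.Str.endswith_eq, hl]
  exact endswith_dotfree domain.toList t' hnd

-- literal-key condition of B's dict lookup
lemma cond_key (lit : String) (a : List Char) (h : String.ofList ('.' :: a) = lit) (t : List Char) :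
    (lit = String.ofList ('.' :: t)) ↔ (t = a) := by
  subst h; rw [String.ofList_inj]; simp [eq_comm]

theorem estimate_timezone_from_domain_spec : Claim_equal_estimate_timezone_from_domain := by
  intro domain _
  unfold Spec_estimate_timezone_from_domain
  have hitems : tldTimezonesA.items = [(".in", "IST (UTC+5:30)"), (".uk", "GMT/BST (UTC+0/+1)"), (".de", "CET (UTC+1)"),
       (".jp", "JST (UTC+9)"), (".au", "AEST (UTC+10)"), (".ca", "Multiple (UTC-8 to UTC-3:30)"),
       (".us", "Multiple (UTC-10 to UTC-4)"), (".com", "Global (Multiple)"),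
       (".org", "Global (Multiple)"), (".net", "Global (Multiple)")] := by decide
  have hmkB : tldTimezonesB = PySem.Dict.mk
      [(".in", "IST (UTC+5:30)"), (".uk", "GMT/BST (UTC+0/+1)"), (".de", "CET (UTC+1)"),
       (".jp", "JST (UTC+9)"), (".au", "AEST (UTC+10)"), (".ca", "Multiple (UTC-8 to UTC-3:30)"),
       (".us", "Multiple (UTC-10 to UTC-4)"), (".com", "Global (Multiple)"),
       (".org", "Global (Multiple)"), (".net", "Global (Multiple)")] := by decide
  by_cases hdot : '.' ∈ domain.toList
  · -- a dot occurs: both sides are decided by the segment after the last '.'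
    simp only [estimate_timezone_from_domain, hitems, tzLoopA,
      hend domain ".in" ['i','n'] rfl (by decide),
      hend domain ".uk" ['u','k'] rfl (by decide),
      hend domain ".de" ['d','e'] rfl (by decide),
      hend domain ".jp" ['j','p'] rfl (by decide),
      hend domain ".au" ['a','u'] rfl (by decide),
      hend domain ".ca" ['c','a'] rfl (by decide),
      hend domain ".us" ['u','s'] rfl (by decide),
      hend domain ".com" ['c','o','m'] rfl (by decide),
      hend domain ".org" ['o','r','g'] rfl (by decide),
      hend domain ".net" ['n','e','t'] rfl (by decide)]
    simp [estimate_timezone_from_domain_alt, hmkB, PySem.Dict.getD, PySem.Dict.get?_mk_cons,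
      hdot,
      cond_key ".in" ['i','n'] rfl, cond_key ".uk" ['u','k'] rfl,
      cond_key ".de" ['d','e'] rfl, cond_key ".jp" ['j','p'] rfl,
      cond_key ".au" ['a','u'] rfl, cond_key ".ca" ['c','a'] rfl,
      cond_key ".us" ['u','s'] rfl, cond_key ".com" ['c','o','m'] rfl,
      cond_key ".org" ['o','r','g'] rfl, cond_key ".net" ['n','e','t'] rfl,
      apply_ite (fun o => Option.getD o "Unknown"),
      show ∀ x : String, (PySem.Dict.mk ([] : List (String × String))).get? x = none from fun _ => rfl]
  · -- no dot: every endswith test fails and B's lookup is skipped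
    have hf : ∀ t : List Char, '.' ∉ t → PySem.Chars.endswith domain.toList ('.' :: t) = false := by
      intro t ht
      rw [Bool.eq_false_iff]
      intro hc
      exact hdot ((endswith_dotfree _ _ ht).mp hc).1
    simp [estimate_timezone_from_domain, hitems, tzLoopA,
      estimate_timezone_from_domain_alt, hdot,
      hf ['i','n'] (by decide), hf ['u','k'] (by decide), hf ['d','e'] (by decide),
      hf ['j','p'] (by decide), hf ['a','u'] (by decide), hf ['c','a'] (by decide),
      hf ['u','s'] (by decide), hf ['c','o','m'] (by decide), hf ['o','r','g'] (by decide),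
      hf ['n','e','t'] (by decide)]
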